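-- pv_equiv track=rewrite | github.com/kimdasomxkimdasom/coding_test | programmers/deque_01.py | solution1
-- ===== SOURCE A (Python) =====
-- def solution1(progresses, speeds):
--     # ── 1단계: 각 작업의 소요일수 계산 ──
--     days = []
--     # zip(progresses, speeds)로 진도와 속도를 한 쌍씩 꺼냄
--     # 예: zip([93,30,55], [1,30,5]) → (93,1), (30,30), (55,5)
--     for p, s in zip(progresses, speeds):
--         cnt = 0
--         while p < 100:  # 진도가 100 미만이면 아직 미완성
--             p += s       # 하루에 s만큼 진도 증가
--             cnt += 1     # 하루 경과
--         days.append(cnt) # 이 작업이 며칠 걸리는지 저장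
--     # 예: progresses=[93,30,55], speeds=[1,30,5]
--     #     → days = [7, 3, 9]
--
--     # ── 2단계: 앞 작업 기준으로 그룹핑 ──
--     result = [1]            # 첫 번째 작업은 무조건 새 배포 그룹 (1개)
--     max_day = days[0]       # 현재 배포 그룹의 기준 일수 (첫 작업 = 7일)
--
--     for i in range(1, len(days)):  # 두 번째 작업부터 순회
--         if days[i] <= max_day:
--             # 기준보다 빨리 끝남 → 앞 작업이랑 같이 배포
--             # result[-1]은 현재 그룹의 개수, 거기에 +1
--             result[-1] += 1
--         else:
--             # 기준보다 늦게 끝남 → 새 배포 그룹 시작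
--             max_day = days[i]   # 기준 일수 갱신
--             result.append(1)    # 새 그룹 추가 (1개부터 시작)
--     # 예: days=[7,3,9]
--     #     i=1: days[1]=3 <= 7 → 같이 배포, result=[2]
--     #     i=2: days[2]=9 > 7  → 새 그룹,   result=[2, 1]
--
--     return result
-- ===== SOURCE B (Python) =====
-- def solution1(progresses, speeds):
--     result = []
--     max_day = None
--     for p, s in zip(progresses, speeds):
--         d = 0 if p >= 100 else -((p - 100) // s)
--         if max_day is None or d > max_day:
--             max_day = d
--             result.append(1)
--         else:
--             result[-1] += 1
--     return result
-- ===== Notes on version B (the rewrite author's own statement) =====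
-- stated objective: alternative
-- what changed: Replaces the two-pass scheme (per-task while-loop day counting into a days list, then an index loop grouping from days[0]) with a single streaming pass over zip(progresses, speeds) that computes each task's days by closed-form ceiling division -((p-100)//s) and groups on the fly with an Optional running max_day.
import Mathlib
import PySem

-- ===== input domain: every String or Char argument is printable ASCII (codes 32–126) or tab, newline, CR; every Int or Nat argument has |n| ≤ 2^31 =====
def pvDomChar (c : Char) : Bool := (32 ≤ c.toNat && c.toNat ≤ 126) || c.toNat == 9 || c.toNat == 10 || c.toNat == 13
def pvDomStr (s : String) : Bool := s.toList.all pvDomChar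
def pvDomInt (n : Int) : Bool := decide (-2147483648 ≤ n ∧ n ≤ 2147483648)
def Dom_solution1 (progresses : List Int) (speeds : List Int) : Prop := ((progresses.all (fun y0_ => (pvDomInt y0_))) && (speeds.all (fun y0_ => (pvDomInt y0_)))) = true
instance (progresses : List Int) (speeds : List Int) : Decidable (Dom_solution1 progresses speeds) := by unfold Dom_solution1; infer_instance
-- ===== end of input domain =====

-- B replaces A's two passes (per-task while-loop day counts into a list, then index
-- grouping from days[0]) with one streaming pass using closed-form ceiling division.

-- ===== PORT A =====
-- result[-1] += 1 : increment the last element of a list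
def pvIncLast : List Int → List Int
  | [] => []
  | [x] => [x + 1]
  | x :: xs => x :: pvIncLast xs

-- 'cnt = 0; while p < 100: p += s; cnt += 1' — the '1 ≤ s' test is only a totality
-- guard (Python diverges when p < 100 and s ≤ 0; Pre_ excludes those inputs)
def pvWhileCnt (p s cnt : Int) : Int :=
  if _h : p < 100 then
    (if _hs : 1 ≤ s then pvWhileCnt (p + s) s (cnt + 1) else cnt)
  else cnt
termination_by (100 - p).toNat
decreasing_by omega

def solution1 (progresses : List Int) (speeds : List Int) : List Int :=
  let days := (progresses.zip speeds).foldl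
      (fun acc pr => acc ++ [pvWhileCnt pr.1 pr.2 0]) []
  match days with
  | [] => []   -- Python raises IndexError at days[0] here (outside Pre_)
  | d0 :: rest =>
    (rest.foldl
      (fun (st : List Int × Int) d =>
        if d ≤ st.2 then (pvIncLast st.1, st.2) else (st.1 ++ [1], d))
      ([1], d0)).1

-- ===== PORT B =====
-- 'd = 0 if p >= 100 else -((p - 100) // s)' (B's closed-form day count)
def pvDays (p s : Int) : Int :=
  if (100:Int) ≤ p then 0 else -(PySem.Int.floordiv (p - 100) s)

def solution1_alt (progresses : List Int) (speeds : List Int) : List Int :=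
  ((progresses.zip speeds).foldl
    (fun (st : List Int × Option Int) pr =>
      let d : Int := pvDays pr.1 pr.2
      match st.2 with
      | none => (st.1 ++ [1], some d)
      | some m => if d > m then (st.1 ++ [1], some d) else (pvIncLast st.1, some m))
    ([], none)).1

-- ===== PRECONDITION & SPEC =====
-- Pre_ excludes exactly the inputs where Python A does not return: an empty zip
-- (IndexError at days[0]) and any unfinished task with nonpositive speed (the
-- while loop diverges).
def Pre_solution1 (progresses : List Int) (speeds : List Int) : Prop :=
  progresses ≠ [] ∧ speeds ≠ [] ∧
  ∀ pr ∈ progresses.zip speeds, pr.1 < 100 → 1 ≤ pr.2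

instance (progresses : List Int) (speeds : List Int) : Decidable (Pre_solution1 progresses speeds) := by
  unfold Pre_solution1; infer_instance

def pvWitness_solution1 : List Int × List Int := ([93, 30, 55], [1, 30, 5])

def Spec_solution1 (progresses : List Int) (speeds : List Int) (out : List Int) : Prop := out = solution1_alt progresses speeds
instance (progresses : List Int) (speeds : List Int) (out : List Int) : Decidable (Spec_solution1 progresses speeds out) := by unfold Spec_solution1; infer_instance

-- ===== CLAIM (what is proved, stated in full; the proofs are below) =====
def Claim_equal_solution1 : Prop := ∀ (progresses : List Int) (speeds : List Int), Dom_solution1 progresses speeds → Pre_solution1 progresses speeds → Spec_solution1 progresses speeds (solution1 progresses speeds)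


-- ===== LEMMAS AND PROOFS =====

theorem pvDays_step (p s : Int) (hp : p < 100) (hs : 1 ≤ s) :
    pvDays p s = 1 + pvDays (p + s) s := by
  unfold pvDays
  rw [if_neg (by omega)]
  by_cases h2 : (100:Int) ≤ p + s
  · rw [if_pos h2]
    have : PySem.Int.floordiv (p - 100) s = -1 := by
      rw [PySem.Int.floordiv_eq_iff_of_pos (by omega)]
      constructor <;> nlinarith
    omega
  · rw [if_neg h2]
    have hb : PySem.Int.floordiv (p + s - 100) s * s ≤ p + s - 100 ∧
        p + s - 100 < (PySem.Int.floordiv (p + s - 100) s + 1) * s :=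
      (PySem.Int.floordiv_eq_iff_of_pos (by omega)).mp rfl
    have : PySem.Int.floordiv (p - 100) s = PySem.Int.floordiv (p + s - 100) s - 1 := by
      rw [PySem.Int.floordiv_eq_iff_of_pos (by omega)]
      constructor <;> nlinarith [hb.1, hb.2]
    omega

theorem pvWhileCnt_eq (p s cnt : Int) (hs : p < 100 → 1 ≤ s) :
    pvWhileCnt p s cnt = cnt + pvDays p s := by
  rw [pvWhileCnt]
  by_cases h : p < 100
  · have hs1 := hs h
    rw [dif_pos h, dif_pos hs1, pvWhileCnt_eq (p + s) s (cnt + 1) (fun _ => hs1),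
        pvDays_step p s h hs1]
    omega
  · rw [dif_neg h]
    unfold pvDays
    rw [if_pos (by omega)]
    omega
termination_by (100 - p).toNat
decreasing_by omega

theorem pvFoldlApp (l : List (Int × Int)) (g : Int × Int → Int) (acc : List Int) :
    l.foldl (fun a pr => a ++ [g pr]) acc = acc ++ l.map g := by
  induction l generalizing acc with
  | nil => simp
  | cons x xs ih => simp [ih]

-- B's fold with a `some` max equals A's grouping fold over the mapped day list
theorem pvGroupEq (l : List (Int × Int)) (r : List Int) (m : Int) :
    (l.foldl
      (fun (st : List Int × Option Int) pr =>
        let d : Int := pvDays pr.1 pr.2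
        match st.2 with
        | none => (st.1 ++ [1], some d)
        | some m => if d > m then (st.1 ++ [1], some d) else (pvIncLast st.1, some m))
      (r, some m)) =
    (fun st : List Int × Int => (st.1, some st.2))
      ((l.map (fun pr => pvDays pr.1 pr.2)).foldl
        (fun (st : List Int × Int) d =>
          if d ≤ st.2 then (pvIncLast st.1, st.2) else (st.1 ++ [1], d))
        (r, m)) := by
  induction l generalizing r m with
  | nil => simp
  | cons pr rest ih =>
    simp only [List.foldl_cons, List.map_cons]
    by_cases h : pvDays pr.1 pr.2 ≤ m
    · rw [if_neg (show ¬ (pvDays pr.1 pr.2 > m) by omega), if_pos h]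
      exact ih _ _
    · rw [if_pos (show pvDays pr.1 pr.2 > m by omega), if_neg h]
      exact ih _ _

-- ===== VERDICT (by name: the statement is the Claim_ definition above) =====
theorem solution1_spec : Claim_equal_solution1 := by
  intro ps ss _ hpre
  obtain ⟨h1, h2, h3⟩ := hpre
  unfold Spec_solution1 solution1 solution1_alt
  rw [pvFoldlApp]
  simp only [List.nil_append]
  have hmap : (ps.zip ss).map (fun pr => pvWhileCnt pr.1 pr.2 0)
      = (ps.zip ss).map (fun pr => pvDays pr.1 pr.2) := by
    apply List.map_congr_left
    intro pr hpr
    rw [pvWhileCnt_eq pr.1 pr.2 0 (h3 pr hpr)]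
    omega
  rw [hmap]
  obtain ⟨pr, rest, hzip⟩ : ∃ pr rest, ps.zip ss = pr :: rest := by
    cases ps with
    | nil => exact absurd rfl h1
    | cons a as =>
      cases ss with
      | nil => exact absurd rfl h2
      | cons b bs => exact ⟨(a, b), as.zip bs, rfl⟩
  rw [hzip]
  simp only [List.map_cons, List.foldl_cons, List.nil_append]
  rw [pvGroupEq]
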